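-- pv_equiv track=rewrite | github.com/elyor04/fast_face_recognition | yuzga_maska.py | getDouble
-- ===== SOURCE A (Python) =====
-- def getDouble(lst: list, last=True) -> list:
--     r_lst, mx = list(), len(lst) - 1
--     for i in range(mx + 1):
--         if i != mx:
--             r_lst.append((lst[i], lst[i + 1]))
--         else:
--             if last:
--                 r_lst.append((lst[i], lst[0]))
--     return r_lst
-- ===== SOURCE B (Python) =====
-- def getDouble(lst: list, last=True) -> list:
--     if not lst:
--         return []
--     tail = (lst[1:] + [lst[0]]) if last else lst[1:]
--     return list(zip(lst, tail))
-- ===== Notes on version B (the rewrite author's own statement) =====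
-- stated objective: simpler
-- what changed: Replaces the indexed loop with its special last-iteration branch by a single zip of the list against its shifted copy (tail, plus the head when last=True), moving the wrap-around into data construction.
import Mathlib
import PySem

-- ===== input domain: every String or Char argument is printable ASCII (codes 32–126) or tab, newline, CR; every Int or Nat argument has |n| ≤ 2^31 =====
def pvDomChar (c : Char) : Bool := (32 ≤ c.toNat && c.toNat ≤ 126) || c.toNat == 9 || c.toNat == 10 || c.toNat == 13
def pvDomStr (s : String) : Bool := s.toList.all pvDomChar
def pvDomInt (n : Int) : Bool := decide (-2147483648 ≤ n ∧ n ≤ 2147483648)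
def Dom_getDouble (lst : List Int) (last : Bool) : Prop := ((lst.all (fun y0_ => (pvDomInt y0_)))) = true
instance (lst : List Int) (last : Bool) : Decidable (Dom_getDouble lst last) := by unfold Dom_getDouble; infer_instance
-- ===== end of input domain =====

-- B replaces A's indexed loop with a special last-iteration branch by zipping the list
-- against its shifted copy (objective: simpler decomposition; same O(n) cost).


-- ===== PORT A =====
-- for i in range(mx + 1): if i != mx: append (lst[i], lst[i+1]) else: if last: append (lst[i], lst[0])
def getDouble (lst : List Int) (last : Bool) : List (Int × Int) :=
  let mx : Int := (lst.length : Int) - 1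
  (PySem.List.pyRange 0 (mx + 1) 1).foldl
    (fun r i =>
      if i ≠ mx then
        r ++ [(PySem.List.pyGetD lst i 0, PySem.List.pyGetD lst (i + 1) 0)]
      else if last then
        r ++ [(PySem.List.pyGetD lst i 0, PySem.List.pyGetD lst 0 0)]
      else r)
    []

-- ===== PORT B =====
-- if not lst: return []; tail = (lst[1:] + [lst[0]]) if last else lst[1:]; return list(zip(lst, tail))
def getDouble_alt (lst : List Int) (last : Bool) : List (Int × Int) :=
  match lst with
  | [] => []
  | x :: _ =>
    let tail := if last then lst.tail ++ [x] else lst.tail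
    lst.zip tail

-- ===== PRECONDITION & SPEC =====
def Spec_getDouble (lst : List Int) (last : Bool) (out : List (Int × Int)) : Prop := out = getDouble_alt lst last
instance (lst : List Int) (last : Bool) (out : List (Int × Int)) : Decidable (Spec_getDouble lst last out) := by unfold Spec_getDouble; infer_instance

-- ===== CLAIM (what is proved, stated in full; the proofs are below) =====
def Claim_equal_getDouble : Prop := ∀ (lst : List Int) (last : Bool), Dom_getDouble lst last → Spec_getDouble lst last (getDouble lst last)

-- ===== LEMMAS AND PROOFS =====

-- A's loop takes the append-consecutive branch everywhere except the final index,
-- so it is the consecutive-pairs map plus the wrap-around pair when `last`.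
lemma getDouble_eq_map (lst : List Int) (last : Bool) (h : lst ≠ []) :
    getDouble lst last =
      (List.range (lst.length - 1)).map
        (fun k => (lst.getD k 0, lst.getD (k + 1) 0)) ++
      (if last then [(lst.getD (lst.length - 1) 0, lst.getD 0 0)] else []) := by
  have hn : 1 ≤ lst.length := List.length_pos_iff.mpr h
  unfold getDouble
  set mx : Int := (lst.length : Int) - 1 with hmx
  simp only []
  have hsplit : PySem.List.pyRange 0 (mx + 1) 1 = PySem.List.pyRange 0 mx 1 ++ [mx] := by
    rw [PySem.List.pyRange_one_succ_right (by omega)]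
  rw [hsplit, List.foldl_append]
  have hin :
      (PySem.List.pyRange 0 mx 1).foldl
        (fun r i =>
          if i ≠ mx then r ++ [(PySem.List.pyGetD lst i 0, PySem.List.pyGetD lst (i + 1) 0)]
          else if last then r ++ [(PySem.List.pyGetD lst i 0, PySem.List.pyGetD lst 0 0)] else r)
        [] =
      (PySem.List.pyRange 0 mx 1).foldl
        (fun r i => r ++ [(PySem.List.pyGetD lst i 0, PySem.List.pyGetD lst (i + 1) 0)]) [] :=
    PySem.List.foldl_congr_mem' _ _ _ _ (by
      intro x hx acc
      have := (PySem.List.mem_pyRange_one).mp hx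
      simp only [if_pos (by omega : x ≠ mx)])
  rw [hin, PySem.List.foldl_append_singleton_eq_map]
  simp only [List.foldl_cons, List.foldl_nil, if_neg (by simp : ¬ mx ≠ mx), List.nil_append]
  have hmx' : mx = ((lst.length - 1 : Nat) : Int) := by omega
  have hrange : PySem.List.pyRange 0 mx 1
      = (List.range (lst.length - 1)).map (fun k : Nat => (k : Int)) := by
    rw [hmx', PySem.List.pyRange_one,
      show ((lst.length - 1 : Nat) : Int) - 0 = ((lst.length - 1 : Nat) : Int) from by ring,
      Int.toNat_natCast]
    exact List.map_congr_left fun k _ => zero_add _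
  rw [hrange, List.map_map]
  have hpref :
      (List.range (lst.length - 1)).map
          ((fun i => (PySem.List.pyGetD lst i 0, PySem.List.pyGetD lst (i + 1) 0)) ∘
            (fun k : Nat => (k : Int))) =
        (List.range (lst.length - 1)).map (fun k => (lst.getD k 0, lst.getD (k + 1) 0)) := by
    refine List.map_congr_left ?_
    intro k hk
    have h1 : ((k : Int)) + 1 = ((k + 1 : Nat) : Int) := by omega
    show (PySem.List.pyGetD lst ((k : Int)) 0, PySem.List.pyGetD lst (((k : Int)) + 1) 0) = _
    rw [h1, PySem.List.pyGetD_natCast, PySem.List.pyGetD_natCast]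
  rw [hpref]
  cases last with
  | false => simp
  | true =>
    rw [if_pos rfl, if_pos rfl, hmx', PySem.List.pyGetD_natCast,
      show (0 : Int) = ((0 : Nat) : Int) from rfl, PySem.List.pyGetD_natCast]

-- zipping a list against its tail is the consecutive-pairs map
lemma zip_tail_eq_map (x : Int) (xs : List Int) :
    (x :: xs).zip xs =
      (List.range xs.length).map (fun k => ((x :: xs).getD k 0, (x :: xs).getD (k + 1) 0)) := by
  induction xs generalizing x with
  | nil => simp
  | cons y ys ih =>
    simp [List.range_succ_eq_map, List.map_map, ih y, Function.comp]

-- appending one element to a one-shorter second list adds exactly one final pair to the zip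
lemma zip_append_getD : ∀ (bs as : List Int) (b : Int), as.length = bs.length + 1 →
    as.zip (bs ++ [b]) = as.zip bs ++ [(as.getD bs.length 0, b)] := by
  intro bs
  induction bs with
  | nil =>
    intro as b h
    match as, h with
    | [a], _ => simp
  | cons c cs ih =>
    intro as b h
    match as, h with
    | a :: as', h =>
      simp only [List.length_cons] at h
      simp [ih as' b (by omega)]

-- ===== VERDICT (by name: the statement is the Claim_ definition above) =====
theorem getDouble_spec : Claim_equal_getDouble := by
  intro lst last _
  unfold Spec_getDouble
  match lst with
  | [] => cases last <;> rfl
  | x :: xs =>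
    rw [getDouble_eq_map (x :: xs) last (by simp)]
    unfold getDouble_alt
    simp only [List.tail_cons, List.length_cons, Nat.add_sub_cancel]
    cases last with
    | false =>
      simp [zip_tail_eq_map x xs]
    | true =>
      rw [if_pos rfl, if_pos rfl,
        zip_append_getD xs (x :: xs) x (by simp),
        zip_tail_eq_map x xs]
      simp
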